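-- pv_equiv track=rewrite | github.com/prasanth-ashokan/My-Programs | cf/aug/decimal.py | st
-- ===== SOURCE A (Python) =====
-- def st(i):
--     i=str(i)
--     t=i[0]
--     sq=''
--     for j in (range(1,len(i))):
--         if t==i[j]:
--             sq+='0'
--         else:
--             t=i[j]
--             sq+=t
--     sq=i[0]+sq
--     return(int(sq))
-- ===== SOURCE B (Python) =====
-- def st(i):
--     s = str(i)
--     out = []
--     p = 0
--     while p < len(s):
--         q = p
--         while q < len(s) and s[q] == s[p]:
--             q += 1
--         out.append(s[p] + '0' * (q - p - 1))
--         p = q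
--     return int(''.join(out))
-- ===== Notes on version B (the rewrite author's own statement) =====
-- stated objective: alternative
-- what changed: B splits the decimal string into maximal runs of equal characters and emits each run's first character followed by zeros for the rest, instead of A's element-by-element comparison against a carried previous character.
import Mathlib
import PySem

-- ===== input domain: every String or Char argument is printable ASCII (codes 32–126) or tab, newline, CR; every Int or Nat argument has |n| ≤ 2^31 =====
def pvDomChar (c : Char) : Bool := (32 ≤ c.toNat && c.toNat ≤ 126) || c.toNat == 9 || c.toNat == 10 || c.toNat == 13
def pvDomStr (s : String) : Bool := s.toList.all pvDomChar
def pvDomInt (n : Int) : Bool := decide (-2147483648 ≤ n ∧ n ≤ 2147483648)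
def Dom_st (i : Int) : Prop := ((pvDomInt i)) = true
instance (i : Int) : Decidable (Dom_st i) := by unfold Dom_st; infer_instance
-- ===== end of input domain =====

-- B rebuilds the number by splitting the decimal string into maximal runs of equal
-- characters (first char of each run kept, the rest become '0'), instead of A's
-- char-by-char comparison with a carried previous character; alternative decomposition.


-- ===== PORT A =====
-- i=str(i); t=i[0]; loop j in range(1,len(i)) comparing t with i[j]; int(i[0]+sq).
-- str(int) is never empty and never fails int(), so the `match`/`getD 0` are
-- totalizing guards on unreachable branches.
def st (i : Int) : Int :=
  let s := (PySem.Int.toStr i).toList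
  match s with
  | [] => 0  -- unreachable: str(i) is nonempty (Python would raise IndexError)
  | c0 :: _ =>
    let r := (PySem.List.pyRange 1 (s.length : Int) 1).foldl
      (fun (p : Char × List Char) j =>
        let cj := PySem.List.pyGetD s j ' '
        if p.1 == cj then (p.1, p.2 ++ ['0']) else (cj, p.2 ++ [cj]))
      (c0, [])
    (PySem.Int.ofChars? (c0 :: r.2)).getD 0

-- ===== PORT B =====
-- Source B's outer while: cut off the maximal run starting at the current position.
def stRuns (l : List Char) : List (List Char) :=
  match l with
  | [] => []
  | c :: xs => (c :: xs.takeWhile (· == c)) :: stRuns (xs.dropWhile (· == c))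
termination_by l.length
decreasing_by
  simp only [List.length_cons]
  exact Nat.lt_succ_of_le (List.length_dropWhile_le _ xs)

-- s[p] + '0' * (q - p - 1) for one run
def stChunk (r : List Char) : List Char :=
  match r with
  | [] => []
  | c :: rest => c :: List.replicate rest.length '0'

def st_alt (i : Int) : Int :=
  let s := (PySem.Int.toStr i).toList
  (PySem.Int.ofChars? (((stRuns s).map stChunk).flatten)).getD 0

-- ===== PRECONDITION & SPEC =====
def Spec_st (i : Int) (out : Int) : Prop := out = st_alt i
instance (i : Int) (out : Int) : Decidable (Spec_st i out) := by unfold Spec_st; infer_instance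

-- ===== CLAIM (what is proved, stated in full; the proofs are below) =====
def Claim_equal_st : Prop := ∀ (i : Int), Dom_st i → Spec_st i (st i)

-- ===== LEMMAS AND PROOFS =====

-- A's loop, written as structural recursion over the tail of the string.
def stAux (t : Char) : List Char → List Char
  | [] => []
  | c :: xs => if t == c then '0' :: stAux t xs else c :: stAux c xs

theorem stAux_foldl (xs : List Char) : ∀ (t : Char) (sq : List Char),
    (xs.foldl (fun (p : Char × List Char) c =>
      if p.1 == c then (p.1, p.2 ++ ['0']) else (c, p.2 ++ [c])) (t, sq)).2
    = sq ++ stAux t xs := by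
  induction xs with
  | nil => intro t sq; simp [stAux]
  | cons c xs ih =>
    intro t sq
    simp only [List.foldl_cons]
    split_ifs with h
    · rw [ih]
      have h' : t = c := by simpa using h
      subst h'
      simp [stAux]
    · rw [ih]
      have h' : ¬ t = c := by simpa using h
      simp [stAux, h']

theorem stAux_run (c : Char) (xs : List Char) :
    stAux c xs = List.replicate (xs.takeWhile (· == c)).length '0' ++
      (match xs.dropWhile (· == c) with
       | [] => []
       | y :: ys => y :: stAux y ys) := by
  induction xs with
  | nil => simp [stAux]
  | cons x xs ih =>
    by_cases h : x = c
    · simp [stAux, h, ih, List.replicate_succ]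
    · simp [stAux, h, Ne.symm h]

theorem stRuns_flatten : ∀ (n : Nat) (c : Char) (xs : List Char), xs.length ≤ n →
    ((stRuns (c :: xs)).map stChunk).flatten = c :: stAux c xs := by
  intro n
  induction n with
  | zero =>
    intro c xs h
    have hx : xs = [] := List.eq_nil_of_length_eq_zero (Nat.le_zero.mp h)
    subst hx
    simp [stRuns, stChunk, stAux]
  | succ n ih =>
    intro c xs h
    rw [stRuns]
    rcases hd : xs.dropWhile (· == c) with _ | ⟨y, ys⟩
    · have : xs.takeWhile (· == c) = xs := by
        have := List.takeWhile_append_dropWhile (p := (· == c)) (l := xs)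
        simpa [hd] using this
      simp [stRuns, stChunk, stAux_run c xs, hd, this]
    · have hlen : ys.length ≤ n := by
        have h1 : (xs.dropWhile (· == c)).length ≤ xs.length :=
          List.length_dropWhile_le _ xs
        rw [hd] at h1
        simp only [List.length_cons] at h1
        omega
      simp [stChunk, ih y ys hlen, stAux_run c xs, hd]

theorem st_eq_alt (i : Int) : st i = st_alt i := by
  unfold st st_alt
  rcases hs : (PySem.Int.toStr i).toList with _ | ⟨c, xs⟩
  · simp only [stRuns, List.map_nil, List.flatten_nil]
    rfl
  · simp only []
    rw [show ((c :: xs).length : Int) = (((c :: xs).length : Nat) : Int) from rfl,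
      PySem.List.foldl_pyRange_pyGetD' (c :: xs) ' '
        (fun (p : Char × List Char) cj =>
          if p.1 == cj then (p.1, p.2 ++ ['0']) else (cj, p.2 ++ [cj]))
        (c, []) (by norm_num)]
    simp only [Int.toNat_one, List.drop_one, List.tail_cons]
    rw [stAux_foldl xs c [], stRuns_flatten xs.length c xs le_rfl]
    simp

-- ===== VERDICT (by name: the statement is the Claim_ definition above) =====
theorem st_spec : Claim_equal_st := by
  intro i _
  unfold Spec_st
  exact st_eq_alt i
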